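-- pv_equiv track=rewrite | github.com/james-stuff/AdventofCode | aoc_2023.py | day_12_group_limits_by_social_distancing
-- ===== SOURCE A (Python) =====
-- def day_12_group_limits_by_social_distancing(section: str, hash_groups: [int],
--                                              return_max_end: bool = False) -> [(int,)]:
--     group_limits = []
--     for gi, hashes_length in enumerate(hash_groups):
--         min_start = day_12_min_space(hash_groups[:gi])
--         max_start = len(section) - day_12_min_space(hash_groups[gi + 1:]) - hashes_length
--         if return_max_end:
--             group_limits.append((min_start,
--                                  len(section) - day_12_min_space(hash_groups[gi + 1:]) - 1))
--         else:
--             group_limits.append((min_start, max_start))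
--     return group_limits
--
-- def day_12_min_space(hash_groups: [int], at_end: bool = True) -> int:
--     return sum(hash_groups) + len(hash_groups) + (not at_end)
-- ===== SOURCE B (Python) =====
-- def day_12_group_limits_by_social_distancing(section: str, hash_groups: [int],
--                                              return_max_end: bool = False) -> [(int,)]:
--     n = len(section)
--     total = sum(hash_groups) + len(hash_groups)
--     group_limits = []
--     pre = 0
--     for h in hash_groups:
--         suffix_space = total - pre - h - 1
--         end = n - suffix_space - (1 if return_max_end else h)
--         group_limits.append((pre, end))
--         pre += h + 1
--     return group_limits
-- ===== Notes on version B (the rewrite author's own statement) =====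
-- stated objective: faster
-- what changed: B keeps a single running prefix accumulator (sum+count of groups already passed) and derives each pair from it and the precomputed total, instead of re-summing the prefix slice and suffix slice of hash_groups for every index.
import Mathlib
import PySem

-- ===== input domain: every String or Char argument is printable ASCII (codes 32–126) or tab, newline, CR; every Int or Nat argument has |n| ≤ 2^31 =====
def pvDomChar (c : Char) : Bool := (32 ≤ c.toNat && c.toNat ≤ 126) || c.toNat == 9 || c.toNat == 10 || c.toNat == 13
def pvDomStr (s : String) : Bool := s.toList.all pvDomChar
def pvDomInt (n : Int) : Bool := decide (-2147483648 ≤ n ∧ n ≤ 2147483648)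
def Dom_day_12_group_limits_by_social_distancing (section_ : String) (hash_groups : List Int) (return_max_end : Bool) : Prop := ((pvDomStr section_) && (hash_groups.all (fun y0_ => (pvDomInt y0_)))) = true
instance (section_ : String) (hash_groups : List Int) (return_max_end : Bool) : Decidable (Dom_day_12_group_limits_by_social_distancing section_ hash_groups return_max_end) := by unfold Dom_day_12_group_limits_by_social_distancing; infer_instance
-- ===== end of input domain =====

-- B replaces A's per-element re-summing of both slices by one pass with a running prefix
-- accumulator (objective: faster, O(n) instead of O(n^2)). Both are total; return values only.

-- ===== PORT A =====
def day_12_min_space (hash_groups : List Int) (at_end : Bool) : Int :=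
  hash_groups.sum + hash_groups.length + (if at_end then 0 else 1)

def pvStepA (section_ : String) (hash_groups : List Int) (return_max_end : Bool)
    (group_limits : List (Int × Int)) (p : Int × Int) : List (Int × Int) :=
  let gi := p.1
  let hashes_length := p.2
  let min_start := day_12_min_space (PySem.List.slice hash_groups none (some gi)) true
  let max_start := PySem.Str.len section_ -
      day_12_min_space (PySem.List.slice hash_groups (some (gi + 1)) none) true - hashes_length
  if return_max_end then
    group_limits ++ [(min_start,
      PySem.Str.len section_ - day_12_min_space (PySem.List.slice hash_groups (some (gi + 1)) none) true - 1)]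
  else
    group_limits ++ [(min_start, max_start)]

def day_12_group_limits_by_social_distancing (section_ : String) (hash_groups : List Int) (return_max_end : Bool) : List (Int × Int) :=
  (PySem.List.enumerate hash_groups 0).foldl (pvStepA section_ hash_groups return_max_end) []

-- ===== PORT B =====
def pvStepB (n total : Int) (return_max_end : Bool)
    (st : Int × List (Int × Int)) (h : Int) : Int × List (Int × Int) :=
  let pre := st.1
  let suffix_space := total - pre - h - 1
  let e := n - suffix_space - (if return_max_end then 1 else h)
  (pre + h + 1, st.2 ++ [(pre, e)])

def day_12_group_limits_by_social_distancing_alt (section_ : String) (hash_groups : List Int) (return_max_end : Bool) : List (Int × Int) :=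
  let n := PySem.Str.len section_
  let total := hash_groups.sum + hash_groups.length
  (hash_groups.foldl (pvStepB n total return_max_end) (0, [])).2

-- ===== PRECONDITION & SPEC =====
def Spec_day_12_group_limits_by_social_distancing (section_ : String) (hash_groups : List Int) (return_max_end : Bool) (out : List (Int × Int)) : Prop := out = day_12_group_limits_by_social_distancing_alt section_ hash_groups return_max_end
instance (section_ : String) (hash_groups : List Int) (return_max_end : Bool) (out : List (Int × Int)) : Decidable (Spec_day_12_group_limits_by_social_distancing section_ hash_groups return_max_end out) := by unfold Spec_day_12_group_limits_by_social_distancing; infer_instance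

-- ===== CLAIM (what is proved, stated in full; the proofs are below) =====
def Claim_equal_day_12_group_limits_by_social_distancing : Prop := ∀ (section_ : String) (hash_groups : List Int) (return_max_end : Bool), Dom_day_12_group_limits_by_social_distancing section_ hash_groups return_max_end → Spec_day_12_group_limits_by_social_distancing section_ hash_groups return_max_end (day_12_group_limits_by_social_distancing section_ hash_groups return_max_end)

-- ===== LEMMAS AND PROOFS =====

-- Loop invariant: with `done` already consumed, A's enumerate-fold over the remainder equals
-- B's accumulator fold started at pre = done.sum + done.length.
lemma pv_key (section_ : String) (rme : Bool) :
    ∀ (rest done : List Int) (acc : List (Int × Int)) (total pre : Int),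
    total = done.sum + done.length + rest.sum + rest.length →
    pre = done.sum + done.length →
    (PySem.List.enumerate rest (done.length : Int)).foldl (pvStepA section_ (done ++ rest) rme) acc
      = (rest.foldl (pvStepB (PySem.Str.len section_) total rme) (pre, acc)).2 := by
  intro rest
  induction rest with
  | nil => intro done acc total pre _ _; simp [PySem.List.enumerate]
  | cons h t ih =>
    intro done acc total pre htot hpre
    rw [PySem.List.enumerate_cons, List.foldl_cons, List.foldl_cons]
    have hslice1 : PySem.List.slice (done ++ h :: t) none (some (done.length : Int)) = done := by
      rw [PySem.List.slice_to_natCast, List.take_left]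
    have hslice2 : PySem.List.slice (done ++ h :: t) (some ((done.length : Int) + 1)) none = t := by
      have : ((done.length : Int) + 1) = ((done.length + 1 : Nat) : Int) := by push_cast; ring
      rw [this, PySem.List.slice_from_natCast]
      have : done ++ h :: t = (done ++ [h]) ++ t := by simp
      rw [this, List.drop_left' (by simp)]
    have hstep : pvStepA section_ (done ++ h :: t) rme acc ((done.length : Int), h)
        = (pvStepB (PySem.Str.len section_) total rme (pre, acc) h).2 := by
      simp only [pvStepA, pvStepB, hslice1, hslice2, day_12_min_space, if_true]
      have he : total - pre - h - 1 = t.sum + (t.length : Int) := by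
        simp at htot; omega
      cases rme <;> simp <;> constructor <;> omega
    have hrw : done ++ h :: t = (done ++ [h]) ++ t := by simp
    rw [hstep]
    have := ih (done ++ [h]) ((pvStepB (PySem.Str.len section_) total rme (pre, acc) h).2) total (pre + h + 1)
      (by simp at htot ⊢; omega) (by simp; omega)
    rw [hrw]
    have hlen : (done.length : Int) + 1 = (((done ++ [h]).length : Nat) : Int) := by simp
    rw [hlen, this]
    rfl

-- ===== VERDICT (by name: the statement is the Claim_ definition above) =====
theorem day_12_group_limits_by_social_distancing_spec : Claim_equal_day_12_group_limits_by_social_distancing := by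
  intro section_ hash_groups return_max_end _
  unfold Spec_day_12_group_limits_by_social_distancing
  unfold day_12_group_limits_by_social_distancing day_12_group_limits_by_social_distancing_alt
  have := pv_key section_ return_max_end hash_groups [] [] (hash_groups.sum + hash_groups.length) 0
    (by simp) (by simp)
  simpa using this
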